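-- pv_equiv track=rewrite | github.com/eduresser/langchain-tess | langchain_tessai/tool_calling.py | _find_balanced_end
-- ===== SOURCE A (Python) =====
-- def _find_balanced_end(text: str, start: int, open_ch: str, close_ch: str) -> int:
--     """Return the index of the closing delimiter that balances *open_ch*
--     at *start*, skipping over JSON strings.  Returns ``-1`` on failure."""
--     depth = 0
--     in_string = False
--     escape = False
--     for i in range(start, len(text)):
--         ch = text[i]
--         if escape:
--             escape = False
--             continue
--         if ch == "\\":
--             if in_string:
--                 escape = True
--             continue
--         if ch == '"':
--             in_string = not in_string
--             continue
--         if in_string: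
--             continue
--         if ch == open_ch:
--             depth += 1
--         elif ch == close_ch:
--             depth -= 1
--             if depth == 0:
--                 return i
--     return -1
-- ===== SOURCE B (Python) =====
-- def _find_balanced_end(text: str, start: int, open_ch: str, close_ch: str) -> int:
--     """Return the index of the closing delimiter that balances *open_ch*
--     at *start*, skipping over JSON strings.  Returns ``-1`` on failure."""
--     n = len(text)
--     depth = 0
--     i = start
--     while i < n:
--         ch = text[i]
--         if ch == '"':
--             # skip the whole string literal in an inner loop
--             i += 1
--             while i < n:
--                 c = text[i]
--                 if c == '\\':
--                     i += 2          # an escape consumes the next char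
--                 elif c == '"':
--                     i += 1
--                     break
--                 else:
--                     i += 1
--             continue
--         if ch == '\\':
--             i += 1                  # lone backslash outside a string: just advance
--             continue
--         if ch == open_ch:
--             depth += 1
--         elif ch == close_ch:
--             depth -= 1
--             if depth == 0:
--                 return i
--         i += 1
--     return -1
-- ===== Notes on version B (the rewrite author's own statement) =====
-- stated objective: alternative
-- what changed: B replaces A's single for-loop with boolean in_string/escape flags by a flagless while-loop: string literals are consumed wholesale by a nested skip loop (a backslash jumps two positions), so the outer scan only ever sees code outside strings.
import Mathlib
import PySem

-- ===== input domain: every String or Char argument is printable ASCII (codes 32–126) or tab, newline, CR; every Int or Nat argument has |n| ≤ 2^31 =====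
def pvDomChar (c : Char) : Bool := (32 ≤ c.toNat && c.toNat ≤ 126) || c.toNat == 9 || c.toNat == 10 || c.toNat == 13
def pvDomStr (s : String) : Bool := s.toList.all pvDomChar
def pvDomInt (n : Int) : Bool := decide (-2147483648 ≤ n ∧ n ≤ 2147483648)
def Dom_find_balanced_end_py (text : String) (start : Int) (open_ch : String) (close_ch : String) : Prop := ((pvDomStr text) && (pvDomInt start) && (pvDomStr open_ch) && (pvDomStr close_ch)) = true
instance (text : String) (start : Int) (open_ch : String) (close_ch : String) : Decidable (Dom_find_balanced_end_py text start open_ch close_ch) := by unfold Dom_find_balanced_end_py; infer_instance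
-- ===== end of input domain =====

-- B scans with a nested string-skipping loop instead of A's in_string/escape boolean flags (alternative decomposition, same cost).


-- ===== PORT A =====
-- A's for-loop over range(start, len(text)) with state (depth, in_string, escape);
-- pyGet? none (IndexError, i < -len) is excluded by Pre_ (returns -1 there as a placeholder).
def loopA (cs : List Char) (oc cc : String) : List Int → Int → Bool → Bool → Int
  | [], _, _, _ => -1
  | i :: rest, depth, in_string, escape =>
    match PySem.List.pyGet? cs i with
    | none => -1
    | some ch =>
      if escape then loopA cs oc cc rest depth in_string false
      else if ch = '\\' then
        (if in_string then loopA cs oc cc rest depth in_string true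
         else loopA cs oc cc rest depth in_string escape)
      else if ch = '"' then loopA cs oc cc rest depth (!in_string) escape
      else if in_string then loopA cs oc cc rest depth in_string escape
      else if String.singleton ch = oc then loopA cs oc cc rest (depth + 1) in_string escape
      else if String.singleton ch = cc then
        (if depth - 1 = 0 then i else loopA cs oc cc rest (depth - 1) in_string escape)
      else loopA cs oc cc rest depth in_string escape

def find_balanced_end_py (text : String) (start : Int) (open_ch : String) (close_ch : String) : Int :=
  loopA text.toList open_ch close_ch
    (PySem.List.pyRange start (text.toList.length : Int) 1) 0 false false

-- ===== PORT B =====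
-- B's while-loops, with a Nat fuel that only totalizes them (each step moves i forward,
-- so fuel (len - i).toNat + 1 is always enough; fuel 0 is never reached on admitted inputs).
-- inner loop: advance past a string literal body starting at index j
def skipStr (cs : List Char) (fuel : Nat) (j : Int) : Int :=
  match fuel with
  | 0 => j
  | fuel + 1 =>
    if j < (cs.length : Int) then
      match PySem.List.pyGet? cs j with
      | none => j   -- IndexError in Python (j < -len); unreachable under Pre_
      | some c =>
        if c = '\\' then skipStr cs fuel (j + 2)
        else if c = '"' then j + 1
        else skipStr cs fuel (j + 1)
    else j

def loopB (cs : List Char) (oc cc : String) (fuel : Nat) (i depth : Int) : Int :=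
  match fuel with
  | 0 => -1
  | fuel + 1 =>
    if i < (cs.length : Int) then
      match PySem.List.pyGet? cs i with
      | none => -1   -- IndexError in Python (i < -len); unreachable under Pre_
      | some ch =>
        if ch = '"' then loopB cs oc cc fuel (skipStr cs fuel (i + 1)) depth
        else if ch = '\\' then loopB cs oc cc fuel (i + 1) depth
        else if String.singleton ch = oc then loopB cs oc cc fuel (i + 1) (depth + 1)
        else if String.singleton ch = cc then
          (if depth - 1 = 0 then i else loopB cs oc cc fuel (i + 1) (depth - 1))
        else loopB cs oc cc fuel (i + 1) depth
    else -1

def find_balanced_end_py_alt (text : String) (start : Int) (open_ch : String) (close_ch : String) : Int :=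
  loopB text.toList open_ch close_ch (((text.toList.length : Int) - start).toNat + 1) start 0

-- ===== PRECONDITION & SPEC =====
-- Pre_ excludes exactly the inputs where A raises IndexError: start < -len(text)
-- (then text[start] is read with an out-of-range negative index).
def Pre_find_balanced_end_py (text : String) (start : Int) (open_ch : String) (close_ch : String) : Prop :=
  -(text.toList.length : Int) ≤ start
instance (text : String) (start : Int) (open_ch : String) (close_ch : String) : Decidable (Pre_find_balanced_end_py text start open_ch close_ch) := by unfold Pre_find_balanced_end_py; infer_instance

def pvWitness_find_balanced_end_py : String × Int × String × String := ("{\"a\\\"}\": 1}", 0, "{", "}")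

def Spec_find_balanced_end_py (text : String) (start : Int) (open_ch : String) (close_ch : String) (out : Int) : Prop := out = find_balanced_end_py_alt text start open_ch close_ch
instance (text : String) (start : Int) (open_ch : String) (close_ch : String) (out : Int) : Decidable (Spec_find_balanced_end_py text start open_ch close_ch out) := by unfold Spec_find_balanced_end_py; infer_instance

-- ===== CLAIM (what is proved, stated in full; the proofs are below) =====
def Claim_equal_find_balanced_end_py : Prop := ∀ (text : String) (start : Int) (open_ch : String) (close_ch : String), Dom_find_balanced_end_py text start open_ch close_ch → Pre_find_balanced_end_py text start open_ch close_ch → Spec_find_balanced_end_py text start open_ch close_ch (find_balanced_end_py text start open_ch close_ch)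

-- ===== LEMMAS AND PROOFS =====

-- Main invariant, by strong induction on the remaining length (f, g are any sufficient fuels):
-- outside a string A's loop equals B's outer loop; inside a string (escape clear)
-- A's flag-driven loop equals B's outer loop resumed after the skip loop.
theorem loop_agree (cs : List Char) (oc cc : String) :
    ∀ (k f g : Nat) (i d : Int),
      ((cs.length : Int) - i).toNat ≤ k →
      ((cs.length : Int) - i).toNat < f →
      ((cs.length : Int) - i).toNat < g →
      -(cs.length : Int) ≤ i →
      (loopA cs oc cc (PySem.List.pyRange i (cs.length : Int) 1) d false false = loopB cs oc cc f i d ∧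
       loopA cs oc cc (PySem.List.pyRange i (cs.length : Int) 1) d true false = loopB cs oc cc f (skipStr cs g i) d) := by
  intro k
  induction k with
  | zero =>
    intro f g i d hk hf hg hi
    have hge : (cs.length : Int) ≤ i := by omega
    obtain ⟨f', rfl⟩ : ∃ f', f = f' + 1 := ⟨f - 1, by omega⟩
    obtain ⟨g', rfl⟩ : ∃ g', g = g' + 1 := ⟨g - 1, by omega⟩
    rw [PySem.List.pyRange_one_eq_nil hge]
    have hs : skipStr cs (g' + 1) i = i := by rw [skipStr]; simp [not_lt.mpr hge]
    rw [hs]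
    constructor <;> (rw [loopB.eq_def]; simp [loopA, not_lt.mpr hge])
  | succ k ih =>
    intro f g i d hk hf hg hi
    by_cases hlt : i < (cs.length : Int)
    · obtain ⟨f', rfl⟩ : ∃ f', f = f' + 1 := ⟨f - 1, by omega⟩
      obtain ⟨g', rfl⟩ : ∃ g', g = g' + 1 := ⟨g - 1, by omega⟩
      -- the loops read text[i]; in range, so pyGet? is some
      cases hgc : PySem.List.pyGet? cs i with
      | none =>
        exfalso
        rw [PySem.List.pyGet?_eq_none_iff] at hgc
        exact hgc ⟨hi, hlt⟩
      | some ch =>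
        rw [PySem.List.pyRange_one_cons hlt]
        constructor
        · -- outside a string
          rw [loopA, loopB.eq_def]
          simp only [hgc, hlt, if_true]
          by_cases hb : ch = '\\'
          · have hq : ¬ ch = '"' := by subst hb; decide
            have hrec := (ih f' f' (i + 1) d (by omega) (by omega) (by omega) (by omega)).1
            simp [hb, hrec]
          · by_cases hq : ch = '"'
            · have hrec := (ih f' f' (i + 1) d (by omega) (by omega) (by omega) (by omega)).2
              simp [hq, hrec]
            · simp only [hb, hq, if_false, Bool.false_eq_true]
              split_ifs with ho hc hd
              · exact (ih f' f' (i + 1) (d + 1) (by omega) (by omega) (by omega) (by omega)).1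
              · rfl
              · exact (ih f' f' (i + 1) (d - 1) (by omega) (by omega) (by omega) (by omega)).1
              · exact (ih f' f' (i + 1) d (by omega) (by omega) (by omega) (by omega)).1
        · -- inside a string
          rw [loopA, skipStr]
          simp only [hgc, hlt, if_true]
          by_cases hb : ch = '\\'
          · -- escape: A consumes the next char through the escape flag, B jumps two
            simp only [hb, if_true]
            by_cases hlt2 : i + 1 < (cs.length : Int)
            · cases hgc2 : PySem.List.pyGet? cs (i + 1) with
              | none =>
                exfalso
                rw [PySem.List.pyGet?_eq_none_iff] at hgc2
                exact hgc2 ⟨by omega, hlt2⟩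
              | some ch2 =>
                rw [PySem.List.pyRange_one_cons hlt2]
                have h2 : i + 1 + 1 = i + 2 := by ring
                -- after the escape, A is back in the plain in-string state at i + 2
                have hrec := (ih (f' + 1) g' (i + 2) d (by omega) (by omega) (by omega) (by omega)).2
                simp only [loopA, hgc2, h2]
                simp [hrec]
            · have hge2 : (cs.length : Int) ≤ i + 1 := by omega
              rw [PySem.List.pyRange_one_eq_nil hge2]
              have hs2 : skipStr cs g' (i + 2) = i + 2 := by
                cases g' <;> rw [skipStr] <;> simp [show ¬ (i + 2 < (cs.length : Int)) by omega]
              rw [hs2, loopB.eq_def]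
              simp [loopA, show ¬ (i + 2 < (cs.length : Int)) by omega]
          · by_cases hq : ch = '"'
            · -- closing quote: both leave the string at i + 1
              have hrec := (ih (f' + 1) (f' + 1) (i + 1) d (by omega) (by omega) (by omega) (by omega)).1
              simp [hq, hrec]
            · -- ordinary char inside the string
              have hrec := (ih (f' + 1) g' (i + 1) d (by omega) (by omega) (by omega) (by omega)).2
              simp [hb, hq, hrec]
    · have hge : (cs.length : Int) ≤ i := by omega
      obtain ⟨f', rfl⟩ : ∃ f', f = f' + 1 := ⟨f - 1, by omega⟩
      obtain ⟨g', rfl⟩ : ∃ g', g = g' + 1 := ⟨g - 1, by omega⟩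
      rw [PySem.List.pyRange_one_eq_nil hge]
      have hs : skipStr cs (g' + 1) i = i := by rw [skipStr]; simp [not_lt.mpr hge]
      rw [hs]
      constructor <;> (rw [loopB.eq_def]; simp [loopA, not_lt.mpr hge])

-- ===== VERDICT (by name: the statement is the Claim_ definition above) =====
theorem find_balanced_end_py_spec : Claim_equal_find_balanced_end_py := by
  intro text start oc cc _hdom hpre
  unfold Spec_find_balanced_end_py find_balanced_end_py find_balanced_end_py_alt
  have hpre' : -(text.toList.length : Int) ≤ start := hpre
  exact (loop_agree text.toList oc cc (((text.toList.length : Int) - start).toNat)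
    (((text.toList.length : Int) - start).toNat + 1) (((text.toList.length : Int) - start).toNat + 1)
    start 0 le_rfl (by omega) (by omega) hpre').1
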